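-- pv_equiv track=rewrite | github.com/bobreddy2009/111 | PythonConcepts/parent_X_x.py | Xx
-- ===== SOURCE A (Python) =====
-- def Xx (x):
--     count = 0
--     for i in x:
--         if i == "x":
--             count += 1
--         elif count > 0 and i == "X":
--             count -= 1
--
--     if count == 0:
--         return "good str"
--     else:
--         return "bad str"
-- ===== SOURCE B (Python) =====
-- def Xx(x):
--     if all(x[i:].count("x") <= x[i:].count("X") for i in range(len(x))):
--         return "good str"
--     return "bad str"
-- ===== Notes on version B (the rewrite author's own statement) =====
-- stated objective: alternative
-- what changed: Replaces the single-pass clamped counter by a brute-force check of every suffix: the string is good iff no suffix contains more lowercase x than uppercase X, verified per suffix with slicing and str.count instead of a running counter.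
import Mathlib
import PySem

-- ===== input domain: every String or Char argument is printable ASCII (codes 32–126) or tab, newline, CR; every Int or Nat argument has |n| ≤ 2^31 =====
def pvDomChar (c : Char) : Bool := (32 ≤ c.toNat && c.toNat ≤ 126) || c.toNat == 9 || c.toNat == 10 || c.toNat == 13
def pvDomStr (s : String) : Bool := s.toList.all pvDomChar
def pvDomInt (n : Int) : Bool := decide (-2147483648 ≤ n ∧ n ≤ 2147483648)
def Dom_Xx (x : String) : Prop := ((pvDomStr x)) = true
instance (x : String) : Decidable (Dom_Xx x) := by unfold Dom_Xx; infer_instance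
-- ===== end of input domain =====

-- B replaces A's one-pass clamped counter by a brute-force per-suffix count check (alternative algorithm, not faster).


-- ===== PORT A =====
def XxStepA (count : Int) (i : Char) : Int :=
  if i = 'x' then count + 1
  else if count > 0 ∧ i = 'X' then count - 1
  else count

def Xx (x : String) : String :=
  let count : Int := x.toList.foldl XxStepA 0
  if count = 0 then "good str" else "bad str"

-- ===== PORT B =====
-- Source B: good iff every suffix x[i:] (i in range(len(x))) has no more lowercase x than uppercase X, via str.count
def Xx_alt (x : String) : String :=
  if (PySem.List.pyRange 0 (PySem.Str.len x) 1).all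
      (fun i => PySem.Str.count (PySem.Str.slice x (some i) none) "x"
                ≤ PySem.Str.count (PySem.Str.slice x (some i) none) "X")
  then "good str" else "bad str"

-- ===== PRECONDITION & SPEC =====
def Spec_Xx (x : String) (out : String) : Prop := out = Xx_alt x
instance (x : String) (out : String) : Decidable (Spec_Xx x out) := by unfold Spec_Xx; infer_instance

-- ===== CLAIM (what is proved, stated in full; the proofs are below) =====
def Claim_equal_Xx : Prop := ∀ (x : String), Dom_Xx x → Spec_Xx x (Xx x)

-- ===== LEMMAS AND PROOFS =====

-- PySem.Chars.count for a one-character pattern is List.count.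
theorem count_go_singleton (c : Char) (l : List Char) : ∀ (fuel acc : Nat), l.length ≤ fuel →
    PySem.Chars.count.go [c] fuel l acc = acc + l.count c := by
  induction l with
  | nil => intro fuel acc h; cases fuel <;> simp [PySem.Chars.count.go]
  | cons hd t ih =>
    intro fuel acc h
    cases fuel with
    | zero => simp at h
    | succ f =>
      rw [PySem.Chars.count.go]
      by_cases hc : hd = c
      · simp [hc, List.isPrefixOf, ih f (acc + 1) (by simpa using h)]
        omega
      · simp [List.isPrefixOf, Ne.symm hc, hc, ih f acc (by simpa using h)]

theorem count_singleton (c : Char) (l : List Char) : PySem.Chars.count l [c] = l.count c := by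
  simp [PySem.Chars.count, count_go_singleton c l l.length 0 le_rfl]

-- Suffix balance #x - #X (as Int) and the per-character unclamped delta.
def xbal (l : List Char) : Int := (l.count 'x' : Int) - (l.count 'X' : Int)

def adel (i : Char) : Int := if i = 'x' then 1 else if i = 'X' then -1 else 0

theorem xbal_cons (i : Char) (t : List Char) : xbal (i :: t) = adel i + xbal t := by
  unfold xbal adel
  by_cases hx : i = 'x'
  · simp [hx]; omega
  · by_cases hX : i = 'X'
    · simp [hX, List.count_cons]; omega
    · simp [hx, hX]

theorem stepA_zero (i : Char) : XxStepA 0 i = max (adel i) 0 := by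
  unfold XxStepA adel
  by_cases hx : i = 'x'
  · simp [hx]
  · by_cases hX : i = 'X' <;> simp [hx, hX]

theorem stepA_eq (i : Char) (c : Int) (h : 0 ≤ c) :
    XxStepA c i = max (c + adel i) (XxStepA 0 i) := by
  unfold XxStepA adel
  by_cases hx : i = 'x'
  · simp [hx]; omega
  · by_cases hX : i = 'X' <;> simp [hx, hX] <;> omega

theorem stepA_nonneg (i : Char) (c : Int) (h : 0 ≤ c) : 0 ≤ XxStepA c i := by
  unfold XxStepA; split_ifs <;> omega

theorem foldA_nonneg (l : List Char) : ∀ c : Int, 0 ≤ c → 0 ≤ l.foldl XxStepA c := by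
  induction l with
  | nil => intro c h; simpa using h
  | cons i t ih => intro c h; exact ih _ (stepA_nonneg i c h)

-- Shift lemma: starting A's loop from c ≥ 0 is the max of c + balance and the run from 0.
theorem foldA_shift (l : List Char) : ∀ c : Int, 0 ≤ c →
    l.foldl XxStepA c = max (c + xbal l) (l.foldl XxStepA 0) := by
  induction l with
  | nil => intro c h; simp [xbal]; omega
  | cons i t ih =>
    intro c h
    simp only [List.foldl_cons]
    rw [ih _ (stepA_nonneg i c h), ih _ (stepA_nonneg i 0 le_rfl),
        stepA_eq i c h, stepA_zero i, xbal_cons]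
    omega

-- A's final counter is 0 iff every suffix balance is ≤ 0.
theorem foldA_zero_iff (l : List Char) :
    l.foldl XxStepA 0 = 0 ↔ ∀ i : Nat, xbal (l.drop i) ≤ 0 := by
  induction l with
  | nil => simp [xbal]
  | cons i t ih =>
    have hFt := foldA_nonneg t 0 le_rfl
    simp only [List.foldl_cons]
    rw [foldA_shift t (XxStepA 0 i) (stepA_nonneg i 0 le_rfl), stepA_zero i]
    constructor
    · intro hz j
      have hF0 : t.foldl XxStepA 0 = 0 := by omega
      cases j with
      | zero => rw [List.drop_zero, xbal_cons]; omega
      | succ k => simpa using (ih.mp hF0) k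
    · intro hA
      have h0' := hA 0
      rw [List.drop_zero, xbal_cons] at h0'
      have h1' : xbal t ≤ 0 := by simpa using hA 1
      have hF0 : t.foldl XxStepA 0 = 0 := ih.mpr (fun k => by simpa using hA (k + 1))
      omega

-- B's test, rewritten as the suffix-balance condition.
theorem Xx_alt_test (x : String) :
    ((PySem.List.pyRange 0 (PySem.Str.len x) 1).all
      (fun i => PySem.Str.count (PySem.Str.slice x (some i) none) "x"
                ≤ PySem.Str.count (PySem.Str.slice x (some i) none) "X")) = true
    ↔ ∀ i : Nat, xbal (x.toList.drop i) ≤ 0 := by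
  have hlen : PySem.Str.len x = (x.toList.length : Int) := PySem.Str.len_eq x
  simp only [List.all_eq_true, PySem.List.mem_pyRange_one, decide_eq_true_eq, hlen]
  constructor
  · intro h i
    by_cases hi : i < x.toList.length
    · have := h (i : Int) ⟨by omega, by omega⟩
      rw [PySem.Str.count_eq, PySem.Str.count_eq] at this
      simp only [PySem.Str.toList_slice, PySem.Chars.slice_eq_listSlice,
        PySem.List.slice_from_natCast] at this
      simp only [show ("x" : String).toList = ['x'] from rfl,
        show ("X" : String).toList = ['X'] from rfl, count_singleton] at this
      unfold xbal; omega
    · rw [List.drop_eq_nil_of_le (by omega)]; simp [xbal]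
  · intro h i hi
    obtain ⟨hi0, hi1⟩ := hi
    rw [PySem.Str.count_eq, PySem.Str.count_eq]
    simp only [PySem.Str.toList_slice, PySem.Chars.slice_eq_listSlice]
    rw [show (i : Int) = ((i.toNat : Nat) : Int) by omega, PySem.List.slice_from_natCast]
    simp only [show ("x" : String).toList = ['x'] from rfl,
      show ("X" : String).toList = ['X'] from rfl, count_singleton]
    have := h i.toNat
    unfold xbal at this; omega

-- ===== VERDICT (by name: the statement is the Claim_ definition above) =====
theorem Xx_spec : Claim_equal_Xx := by
  intro x _
  unfold Spec_Xx Xx Xx_alt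
  by_cases hb : ((PySem.List.pyRange 0 (PySem.Str.len x) 1).all
      (fun i => PySem.Str.count (PySem.Str.slice x (some i) none) "x"
                ≤ PySem.Str.count (PySem.Str.slice x (some i) none) "X")) = true
  · have hA : x.toList.foldl XxStepA 0 = 0 :=
      (foldA_zero_iff _).mpr ((Xx_alt_test x).mp hb)
    show (if x.toList.foldl XxStepA 0 = 0 then "good str" else "bad str") = _
    rw [if_pos hA, if_pos hb]
  · have hA : ¬ x.toList.foldl XxStepA 0 = 0 := fun h =>
      hb ((Xx_alt_test x).mpr ((foldA_zero_iff _).mp h))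
    show (if x.toList.foldl XxStepA 0 = 0 then "good str" else "bad str") = _
    rw [if_neg hA, if_neg hb]
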